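-- pv_equiv track=rewrite | github.com/lake041/algorithm-hana | 권민선/0526_joystick.py | right_straight
-- ===== SOURCE A (Python) =====
-- def right_straight(arr): #오른쪽에서 A가 아닌 문자가 시작하는 위치 찾기
--     ans = 0
--     for ar in arr[::-1]:
--         if ar == 0:
--             ans += 1
--         else:
--             break
--     return len(arr) - ans
-- ===== SOURCE B (Python) =====
-- def right_straight(arr):
--     ans = 0
--     for i, ar in enumerate(arr):
--         if ar != 0:
--             ans = i + 1
--     return ans
-- ===== Notes on version B (the rewrite author's own statement) =====
-- stated objective: alternative
-- what changed: Replaces the reversed-copy scan that counts trailing zeros (with early break) and subtracts from len(arr) by a single forward enumerate pass that tracks the boundary just past the last non-zero element, with no list copy/reversal.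
import Mathlib
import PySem

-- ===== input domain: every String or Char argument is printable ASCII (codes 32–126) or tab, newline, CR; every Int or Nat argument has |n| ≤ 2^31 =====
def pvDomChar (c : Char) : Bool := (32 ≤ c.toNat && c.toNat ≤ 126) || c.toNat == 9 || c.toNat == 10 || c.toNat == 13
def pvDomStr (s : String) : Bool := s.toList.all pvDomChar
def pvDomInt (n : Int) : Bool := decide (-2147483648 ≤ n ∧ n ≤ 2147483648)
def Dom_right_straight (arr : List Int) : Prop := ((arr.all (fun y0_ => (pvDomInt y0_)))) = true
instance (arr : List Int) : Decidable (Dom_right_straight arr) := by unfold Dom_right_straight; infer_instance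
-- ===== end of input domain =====

-- B replaces A's reversed-copy trailing-zero count by a forward enumerate scan tracking the boundary past the last non-zero element (alternative decomposition, same cost).

-- ===== PORT A =====
-- the for-loop over arr[::-1] with break: counts leading zeros of the reversed list until the first non-zero
def pvCntA : List Int → Int
  | [] => 0
  | a :: rest => if a = 0 then pvCntA rest + 1 else 0

def right_straight (arr : List Int) : Int :=
  -- arr[::-1] is ported as arr.reverse (exact for step -1 full slice)
  (arr.length : Int) - pvCntA arr.reverse

-- ===== PORT B =====
-- the 'for i, ar in enumerate(arr)' loop carrying ans
def pvGoB : List Int → Int → Int → Int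
  | [], _, ans => ans
  | a :: rest, i, ans => pvGoB rest (i + 1) (if a ≠ 0 then i + 1 else ans)

def right_straight_alt (arr : List Int) : Int := pvGoB arr 0 0

-- ===== PRECONDITION & SPEC =====
def Spec_right_straight (arr : List Int) (out : Int) : Prop := out = right_straight_alt arr
instance (arr : List Int) (out : Int) : Decidable (Spec_right_straight arr out) := by unfold Spec_right_straight; infer_instance

-- ===== CLAIM (what is proved, stated in full; the proofs are below) =====
def Claim_equal_right_straight : Prop := ∀ (arr : List Int), Dom_right_straight arr → Spec_right_straight arr (right_straight arr)

-- ===== LEMMAS AND PROOFS =====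
theorem pvGoB_append (l : List Int) (x i ans : Int) :
    pvGoB (l ++ [x]) i ans = if x = 0 then pvGoB l i ans else i + (l.length : Int) + 1 := by
  induction l generalizing i ans with
  | nil => simp [pvGoB]
  | cons a l ih =>
      simp only [List.cons_append, pvGoB, ih]
      split_ifs <;>
        first
          | rfl
          | (simp only [List.length_cons, Nat.cast_add, Nat.cast_one]; ring)

theorem main_eq (arr : List Int) : right_straight arr = right_straight_alt arr := by
  induction arr using List.reverseRecOn with
  | nil => simp [right_straight, right_straight_alt, pvCntA, pvGoB]
  | append_singleton l x ih =>
      simp only [right_straight, right_straight_alt] at *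
      rw [pvGoB_append]
      rw [List.reverse_append, List.reverse_singleton, List.singleton_append]
      simp only [pvCntA, List.length_append, List.length_singleton]
      split_ifs with h
      · push_cast; omega
      · push_cast; ring

-- ===== VERDICT (by name: the statement is the Claim_ definition above) =====
theorem right_straight_spec : Claim_equal_right_straight := by
  intro arr _
  exact main_eq arr
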